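-- pv_equiv track=rewrite | github.com/rejunity/tiny-asic-1_58bit-matrix-mul | test/utils.py | pack_weights
-- ===== SOURCE A (Python) =====
-- def pack_weights(weights, weights_per_byte=4):
--     packed = 0
--     if weights_per_byte == 5:
--         for i in weights:
--             if i == 0: w =   00
--             if i > 0:  w = 0b01
--             if i < 0:  w = 0b10
--             packed = (packed * 3) + w
--     else: # if weights_per_byte == 4:
--         for i in weights:
--             w = 0b11 if i  < 0 else 1
--             w =    0 if i == 0 else w
--             packed = (packed << 2) | w
--     return packed
-- ===== SOURCE B (Python) =====
-- def pack_weights(weights, weights_per_byte=4):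
--     base = 3 if weights_per_byte == 5 else 4
--     def digit(i):
--         if i == 0:
--             return 0
--         if weights_per_byte == 5:
--             return 1 if i > 0 else 2
--         return 1 if i > 0 else 3
--     result = 0
--     power = 1
--     for i in reversed(list(weights)):
--         result += digit(i) * power
--         power *= base
--     return result
-- ===== Notes on version B (the rewrite author's own statement) =====
-- stated objective: alternative
-- what changed: Replaces the left-to-right Horner/shift accumulation with a right-to-left positional-polynomial sum maintaining a running place-value power, with one digit map parametrised by the base instead of two in-loop reassignment chains.
import Mathlib
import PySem

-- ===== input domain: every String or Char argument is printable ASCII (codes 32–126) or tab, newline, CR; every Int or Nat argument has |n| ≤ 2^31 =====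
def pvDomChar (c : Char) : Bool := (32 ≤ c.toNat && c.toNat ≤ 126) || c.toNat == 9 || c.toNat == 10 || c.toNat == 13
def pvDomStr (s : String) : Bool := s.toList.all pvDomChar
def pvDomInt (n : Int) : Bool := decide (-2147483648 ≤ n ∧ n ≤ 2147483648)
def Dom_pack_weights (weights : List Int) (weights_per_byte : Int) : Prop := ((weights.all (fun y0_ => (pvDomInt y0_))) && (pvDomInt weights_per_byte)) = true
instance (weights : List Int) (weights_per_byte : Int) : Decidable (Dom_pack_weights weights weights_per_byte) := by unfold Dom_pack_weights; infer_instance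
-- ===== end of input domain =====

-- B replaces A's left-to-right shift/Horner accumulation by a right-to-left positional sum
-- with a running place-value power and one base-parametrised digit map (objective: alternative).

-- ===== PORT A =====
-- In the weights_per_byte == 5 loop, A's three `if` statements are mutually exclusive and
-- cover all ints, so `w` is ported as the equivalent nested if-expression.
def pack_weights (weights : List Int) (weights_per_byte : Int) : Int :=
  if weights_per_byte == 5 then
    weights.foldl (fun packed i =>
      let w : Int := if i == 0 then 0 else if i > 0 then 1 else 2
      packed * 3 + w) 0
  else
    weights.foldl (fun packed i =>
      let w : Int := if i < 0 then 3 else 1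
      let w : Int := if i == 0 then 0 else w
      PySem.Int.bor (packed <<< (2 : Nat)) w) 0

-- ===== PORT B =====
def pack_weights_alt (weights : List Int) (weights_per_byte : Int) : Int :=
  let base : Int := if weights_per_byte == 5 then 3 else 4
  let digit : Int → Int := fun i =>
    if i == 0 then 0
    else if weights_per_byte == 5 then (if i > 0 then 1 else 2)
    else (if i > 0 then 1 else 3)
  (weights.reverse.foldl
    (fun (rp : Int × Int) i => (rp.1 + digit i * rp.2, rp.2 * base)) ((0 : Int), (1 : Int))).1

-- ===== PRECONDITION & SPEC =====
def Spec_pack_weights (weights : List Int) (weights_per_byte : Int) (out : Int) : Prop := out = pack_weights_alt weights weights_per_byte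
instance (weights : List Int) (weights_per_byte : Int) (out : Int) : Decidable (Spec_pack_weights weights weights_per_byte out) := by unfold Spec_pack_weights; infer_instance

-- ===== CLAIM (what is proved, stated in full; the proofs are below) =====
def Claim_equal_pack_weights : Prop := ∀ (weights : List Int) (weights_per_byte : Int), Dom_pack_weights weights weights_per_byte → Spec_pack_weights weights weights_per_byte (pack_weights weights weights_per_byte)

-- ===== LEMMAS AND PROOFS =====

-- For k < 4, the low two bits of 4*n are free, so `or` is addition.
theorem pv_four_lor (n k : ℕ) (hk : k < 4) : 4 * n ||| k = 4 * n + k := by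
  have hb : ∀ m : ℕ, ∀ b : Bool, Nat.bit b m = 2 * m + b.toNat := by
    intro m b; cases b <;> simp [Nat.bit_val]
  have h4 : 4 * n = Nat.bit false (Nat.bit false n) := by simp [hb]; ring
  interval_cases k
  · simp
  · have h1 : (1:ℕ) = Nat.bit true 0 := by simp [hb]
    rw [h4, h1]; simp only [Nat.lor_bit]; simp [hb]
  · have h1 : (2:ℕ) = Nat.bit false (Nat.bit true 0) := by simp [hb]
    rw [h4, h1]; simp only [Nat.lor_bit]; simp [hb]; ring
  · have h1 : (3:ℕ) = Nat.bit true (Nat.bit true 0) := by simp [hb]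
    rw [h4, h1]; simp only [Nat.lor_bit]; simp [hb]; ring

-- On nonnegative `a` and a two-bit digit `w`, Python's `(a << 2) | w` is `a*4 + w`.
theorem pv_shift_or (a w : Int) (ha : 0 ≤ a) (hw : 0 ≤ w ∧ w < 4) :
    PySem.Int.bor (a <<< (2 : Nat)) w = a * 4 + w := by
  obtain ⟨n, rfl⟩ := Int.eq_ofNat_of_zero_le ha
  obtain ⟨k, rfl⟩ := Int.eq_ofNat_of_zero_le hw.1
  have hk : k < 4 := by exact_mod_cast hw.2
  have hsh : ((n : Int) <<< (2 : Nat)) = ((n <<< 2 : ℕ) : Int) := by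
    simp [Int.natCast_shiftLeft]
  rw [hsh, PySem.Int.bor_natCast]
  have h2 : n <<< 2 = 4 * n := by rw [Nat.shiftLeft_eq]; ring
  rw [h2, pv_four_lor n k hk]
  push_cast; ring

-- The reverse fold with a running power computes Horner's value: generalised over (r, p).
theorem pv_horner_rev (d : Int → Int) (b : Int) (ws : List Int) :
    ∀ r p : Int,
      (ws.reverse.foldl (fun (rp : Int × Int) i => (rp.1 + d i * rp.2, rp.2 * b)) (r, p)).1
        = (ws.foldl (fun q i => q * b + d i) 0) * p + r := by
  induction ws using List.reverseRecOn with
  | nil => intro r p; simp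
  | append_singleton ys x ih =>
    intro r p
    simp only [List.reverse_append, List.reverse_singleton, List.singleton_append,
      List.foldl_cons, List.foldl_append, List.foldl_nil]
    rw [ih]
    ring

-- The shift/or loop of A's else-branch equals the arithmetic Horner loop with B's digit map.
theorem pv_shift_fold (ws : List Int) :
    ∀ a : Int, 0 ≤ a →
      ws.foldl (fun packed i =>
          let w : Int := if i < 0 then 3 else 1
          let w : Int := if i == 0 then 0 else w
          PySem.Int.bor (packed <<< (2 : Nat)) w) a
      = ws.foldl (fun q i => q * 4 + (if i == 0 then 0 else if i > 0 then 1 else 3)) a := by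
  induction ws with
  | nil => intro a _; rfl
  | cons x xs ih =>
    intro a ha
    simp only [List.foldl_cons]
    have hw : (if (x == 0) then (0:Int) else if x < 0 then 3 else 1)
        = (if x == 0 then 0 else if x > 0 then 1 else 3) := by
      by_cases h0 : x = 0 <;> simp [h0] <;> split_ifs <;> omega
    have hwb : 0 ≤ (if (x == 0) then (0:Int) else if x < 0 then 3 else 1) ∧
        (if (x == 0) then (0:Int) else if x < 0 then 3 else 1) < 4 := by
      split_ifs <;> norm_num
    have hstep := pv_shift_or a _ ha hwb
    simp only [] at hstep ⊢
    rw [hstep, hw]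
    exact ih _ (by split_ifs at hw ⊢ <;> nlinarith [ha])

-- ===== VERDICT (by name: the statement is the Claim_ definition above) =====
theorem pack_weights_spec : Claim_equal_pack_weights := by
  intro ws wpb _
  unfold Spec_pack_weights pack_weights pack_weights_alt
  by_cases h5 : wpb = 5
  · simp only [h5, beq_self_eq_true, if_true]
    rw [pv_horner_rev (fun i => if i == 0 then (0:Int) else if i > 0 then 1 else 2) 3 ws 0 1]
    ring
  · have hb : (wpb == 5) = false := by simp [h5]
    simp only [hb, Bool.false_eq_true, if_false]
    rw [pv_horner_rev (fun i => if i == 0 then (0:Int) else if i > 0 then 1 else 3) 4 ws 0 1]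
    rw [pv_shift_fold ws 0 le_rfl]
    ring
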